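-- pv_equiv track=rewrite | github.com/adrianeyre/codewars | Python/7KYU/Check.py | make_checkered_board
-- ===== SOURCE A (Python) =====
-- def make_checkered_board(n):
--     result = []
--     for x in range(0,n):
--         temp = []
--         for y in range(0,n):
--             temp.append("X") if (x+y) % 2 == 0 else temp.append("O")
--         result.append(temp)
--     return result
-- ===== SOURCE B (Python) =====
-- def make_checkered_board(n):
--     row_even = ["X" if y % 2 == 0 else "O" for y in range(n)]
--     row_odd = ["O" if y % 2 == 0 else "X" for y in range(n)]
--     return [list(row_even) if x % 2 == 0 else list(row_odd) for x in range(n)]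
-- ===== Notes on version B (the rewrite author's own statement) =====
-- stated objective: alternative
-- what changed: B precomputes the two alternating template rows once and assembles the board by selecting a copy of the even or odd row per row parity, instead of A's nested loop recomputing every cell from (x+y) % 2.
import Mathlib
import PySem

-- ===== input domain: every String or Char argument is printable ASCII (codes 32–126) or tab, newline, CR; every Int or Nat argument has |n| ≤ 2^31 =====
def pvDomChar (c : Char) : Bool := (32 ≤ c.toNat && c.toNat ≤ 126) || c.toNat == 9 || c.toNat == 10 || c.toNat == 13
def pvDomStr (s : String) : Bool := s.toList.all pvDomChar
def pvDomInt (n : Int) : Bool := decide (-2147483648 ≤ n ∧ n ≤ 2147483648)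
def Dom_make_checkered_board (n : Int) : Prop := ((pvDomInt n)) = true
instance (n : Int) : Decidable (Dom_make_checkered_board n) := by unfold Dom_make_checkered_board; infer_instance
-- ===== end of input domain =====

-- ===== PORT A =====
-- A: nested loops, each cell from (x+y) % 2, rows appended to result.
def make_checkered_board (n : Int) : List (List String) :=
  (PySem.List.pyRange 0 n 1).foldl (fun result x =>
    result ++ [(PySem.List.pyRange 0 n 1).foldl (fun temp y =>
      if PySem.Int.mod (x + y) 2 = 0 then temp ++ ["X"] else temp ++ ["O"]) []]) []

-- ===== PORT B =====
-- B: two template rows built once, board assembled by row-parity selection.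
def make_checkered_board_alt (n : Int) : List (List String) :=
  let row_even := (PySem.List.pyRange 0 n 1).map (fun y => if PySem.Int.mod y 2 = 0 then "X" else "O")
  let row_odd := (PySem.List.pyRange 0 n 1).map (fun y => if PySem.Int.mod y 2 = 0 then "O" else "X")
  (PySem.List.pyRange 0 n 1).map (fun x => if PySem.Int.mod x 2 = 0 then row_even else row_odd)

-- ===== PRECONDITION & SPEC =====
def Spec_make_checkered_board (n : Int) (out : List (List String)) : Prop := out = make_checkered_board_alt n
instance (n : Int) (out : List (List String)) : Decidable (Spec_make_checkered_board n out) := by unfold Spec_make_checkered_board; infer_instance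

-- ===== CLAIM (what is proved, stated in full; the proofs are below) =====
def Claim_equal_make_checkered_board : Prop := ∀ (n : Int), Dom_make_checkered_board n → Spec_make_checkered_board n (make_checkered_board n)

-- ===== LEMMAS AND PROOFS =====

-- ===== VERDICT (by name: the statement is the Claim_ definition above) =====
-- foldl with snoc is map
theorem pv_foldl_snoc {α β : Type} (f : α → β) (l : List α) (init : List β) :
    l.foldl (fun acc x => acc ++ [f x]) init = init ++ l.map f := by
  induction l generalizing init with
  | nil => simp
  | cons a t ih => simp [List.foldl_cons, ih]

theorem pv_inner_row (x n : Int) :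
    (PySem.List.pyRange 0 n 1).foldl (fun temp y =>
      if PySem.Int.mod (x + y) 2 = 0 then temp ++ ["X"] else temp ++ ["O"]) []
    = (PySem.List.pyRange 0 n 1).map (fun y => if PySem.Int.mod (x + y) 2 = 0 then "X" else "O") := by
  have h := pv_foldl_snoc (fun y => if PySem.Int.mod (x + y) 2 = 0 then "X" else "O")
    (PySem.List.pyRange 0 n 1) []
  simp only [List.nil_append] at h
  rw [← h]
  congr 1
  funext acc y
  split_ifs <;> rfl

theorem make_checkered_board_spec : Claim_equal_make_checkered_board := by
  intro n _
  unfold Spec_make_checkered_board make_checkered_board make_checkered_board_alt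
  rw [pv_foldl_snoc (fun x => (PySem.List.pyRange 0 n 1).foldl (fun temp y =>
      if PySem.Int.mod (x + y) 2 = 0 then temp ++ ["X"] else temp ++ ["O"]) []) _ []]
  simp only [List.nil_append]
  apply List.map_congr_left
  intro x _
  rw [pv_inner_row]
  simp only [PySem.Int.mod_eq_zero_iff_dvd]
  by_cases hx : (2 : Int) ∣ x
  · simp only [hx, if_true]
    exact List.map_congr_left (fun y _ => by split_ifs <;> first | rfl | omega)
  · simp only [hx, if_false]
    exact List.map_congr_left (fun y _ => by split_ifs <;> first | rfl | omega)
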